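-- pv_equiv track=rewrite | github.com/psyfb2/Chatbot | models/text_preprocessing.py | remove_first_num
-- ===== SOURCE A (Python) =====
-- import string
--
-- def remove_first_num(strr):
--     for i in range(len(strr)):
--         if strr[i] in string.digits:
--             # found the first number
--             count = 1
--             while True:
--                 if i + count >= len(strr) or strr[i + count] not in string.digits:
--                     indicies = [x for x in range(i, i + count)]
--                     cpy = [strr[j] for j in range(len(strr)) if j not in indicies]
--                     return ''.join(cpy)
--                 count += 1
--     # string does not contain any numbers
--     return strr
-- ===== SOURCE B (Python) =====
-- def remove_first_num(strr):
--     n = len(strr)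
--     i = 0
--     while i < n and strr[i] not in "0123456789":
--         i += 1
--     j = i
--     while j < n and strr[j] in "0123456789":
--         j += 1
--     return strr[:i] + strr[j:]
-- ===== Notes on version B (the rewrite author's own statement) =====
-- stated objective: simpler
-- what changed: B finds the boundaries of the first digit run with two index scans and returns the concatenation of two slices, instead of A's collecting the run's indices in a list and rebuilding the whole string by filtering every position through an index-membership scan.
import Mathlib
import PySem

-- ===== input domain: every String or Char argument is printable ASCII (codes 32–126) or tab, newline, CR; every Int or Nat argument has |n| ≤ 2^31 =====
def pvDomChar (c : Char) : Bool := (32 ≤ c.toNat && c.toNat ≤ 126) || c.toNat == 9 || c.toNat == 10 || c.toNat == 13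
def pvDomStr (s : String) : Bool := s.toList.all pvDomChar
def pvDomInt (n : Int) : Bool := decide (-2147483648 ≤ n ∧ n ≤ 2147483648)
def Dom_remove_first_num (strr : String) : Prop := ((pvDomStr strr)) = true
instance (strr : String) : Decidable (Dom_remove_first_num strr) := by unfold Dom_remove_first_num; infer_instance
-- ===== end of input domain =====

-- B removes the first digit run with two index scans and two slices instead of rebuilding
-- the string by filtering every position against an index list (objective: simpler).

-- ===== PORT A =====
-- string.digits
def pvDigits : List Char := "0123456789".toList

-- the inner 'while True' loop: count starts at 1 and grows until i+count is out of range or non-digit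
def pvCountLoop (l : List Char) (i count : Nat) : Nat :=
  if l.length ≤ i + count ∨ ¬ pvDigits.contains (l.getD (i + count) ' ') then count
  else pvCountLoop l i (count + 1)
termination_by l.length - (i + count)
decreasing_by omega

-- the outer 'for i in range(len(strr))' loop with its early return;
-- indicies = [x for x in range(i, i+count)], cpy = [strr[j] for j in range(len(strr)) if j not in indicies]
def pvOuterA (l : List Char) (i : Nat) : String :=
  if i < l.length then
    if pvDigits.contains (l.getD i ' ') then
      String.ofList
        (((List.range l.length).filter
            (fun j => ¬ (List.range' i (pvCountLoop l i 1)).contains j)).map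
          (fun j => l.getD j ' '))
    else pvOuterA l (i + 1)
  else String.ofList l
termination_by l.length - i
decreasing_by omega

def remove_first_num (strr : String) : String := pvOuterA strr.toList 0

-- ===== PORT B =====
-- first while loop of Source B: index of the first digit (length of the list if none)
def pvAltFirst : List Char → Nat
  | [] => 0
  | c :: t => if pvDigits.contains c then 0 else pvAltFirst t + 1

-- second while loop of Source B: length of the leading digit run
def pvAltRun : List Char → Nat
  | [] => 0
  | c :: t => if pvDigits.contains c then pvAltRun t + 1 else 0

-- strr[:i] + strr[j:]
def remove_first_num_alt (strr : String) : String :=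
  let l := strr.toList
  let i := pvAltFirst l
  let j := i + pvAltRun (l.drop i)
  String.ofList (l.take i ++ l.drop j)

-- ===== PRECONDITION & SPEC =====
def Spec_remove_first_num (strr : String) (out : String) : Prop := out = remove_first_num_alt strr
instance (strr : String) (out : String) : Decidable (Spec_remove_first_num strr out) := by unfold Spec_remove_first_num; infer_instance

-- ===== CLAIM (what is proved, stated in full; the proofs are below) =====
def Claim_equal_remove_first_num : Prop := ∀ (strr : String), Dom_remove_first_num strr → Spec_remove_first_num strr (remove_first_num strr)

-- ===== LEMMAS AND PROOFS =====

-- if no digit occurs before i and l[i] is a digit, the first while loop stops at i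
theorem pvAltFirst_eq (l : List Char) (i : Nat) (hi : i < l.length)
    (hpre : ∀ k, (hk : k < l.length) → k < i → ¬ pvDigits.contains l[k])
    (hdig : pvDigits.contains l[i]) : pvAltFirst l = i := by
  induction l generalizing i with
  | nil => simp at hi
  | cons c t ih =>
    cases i with
    | zero => simpa [pvAltFirst] using hdig
    | succ j =>
      have hc : pvDigits.contains c = false := by
        have := hpre 0 (by simp) (by omega); simpa using this
      simp only [pvAltFirst, hc, if_neg Bool.false_ne_true]
      have : pvAltFirst t = j := by
        apply ih j (by simpa using hi)
        · intro k hk hkj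
          have := hpre (k + 1) (by simpa using hk) (by omega)
          simpa using this
        · simpa using hdig
      omega

-- if no digit occurs anywhere, the first while loop runs to the end
theorem pvAltFirst_eq_length (l : List Char)
    (hpre : ∀ k, (hk : k < l.length) → ¬ pvDigits.contains l[k]) :
    pvAltFirst l = l.length := by
  induction l with
  | nil => simp [pvAltFirst]
  | cons c t ih =>
    have hc : pvDigits.contains c = false := by simpa using hpre 0 (by simp)
    simp only [pvAltFirst, hc, if_neg Bool.false_ne_true, List.length_cons]
    have : pvAltFirst t = t.length := by
      apply ih; intro k hk
      have := hpre (k + 1) (by simpa using hk); simpa using this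
    omega

theorem pvCountLoop_eq (l : List Char) (i m : Nat) :
    pvCountLoop l i m = m + pvAltRun (l.drop (i + m)) := by
  unfold pvCountLoop
  split
  · rename_i h
    have : pvAltRun (l.drop (i + m)) = 0 := by
      by_cases hlen : i + m < l.length
      · have hnd : l[i + m] ∉ pvDigits := by
          rcases h with h | h
          · omega
          · rw [List.getD_eq_getElem l ' ' hlen] at h; simpa using h
        rw [List.drop_eq_getElem_cons hlen]
        simp [pvAltRun, hnd]
      · rw [List.drop_eq_nil_of_le (show l.length ≤ i + m by omega)]
        simp [pvAltRun]
    omega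
  · rename_i h
    have hlt : i + m < l.length := by
      by_contra hc
      exact h (Or.inl (by omega))
    have hdig : pvDigits.contains (l.getD (i + m) ' ') = true := by
      by_contra hc
      exact h (Or.inr hc)
    have heq : pvCountLoop l i (m + 1) = (m + 1) + pvAltRun (l.drop (i + (m + 1))) :=
      pvCountLoop_eq l i (m + 1)
    rw [heq]
    rw [List.getD_eq_getElem l ' ' hlt] at hdig
    rw [List.drop_eq_getElem_cons hlt]
    have h1 : i + (m + 1) = i + m + 1 := by omega
    rw [h1]
    simp only [pvAltRun]
    rw [if_pos hdig]
    omega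
termination_by l.length - (i + m)
decreasing_by omega

-- the filtered index list is an initial range plus a tail range
theorem pvFilter_range (n i c : Nat) :
    (List.range n).filter (fun j => ¬ (List.range' i c).contains j) =
      List.range (min n i) ++ List.range' (i + c) (n - (i + c)) := by
  induction n with
  | zero => simp
  | succ n ih =>
    rw [List.range_succ, List.filter_append, ih, List.filter_singleton, Bool.cond_decide]
    by_cases h1 : n < i
    · rw [if_pos (by simp [List.mem_range'_1]; omega)]
      have hmin : min (n + 1) i = n + 1 := by omega
      have hmin2 : min n i = n := by omega
      have h0 : (n + 1) - (i + c) = 0 := by omega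
      have h0' : n - (i + c) = 0 := by omega
      rw [hmin, hmin2, h0, h0', List.range'_zero, List.append_nil, List.append_nil,
        List.range_succ]
    · by_cases h2 : n < i + c
      · rw [if_neg (by simp [List.mem_range'_1]; omega)]
        have hmin : min (n + 1) i = min n i := by omega
        have h0 : (n + 1) - (i + c) = 0 := by omega
        have h0' : n - (i + c) = 0 := by omega
        rw [hmin, h0, h0', List.append_nil]
      · rw [if_pos (by simp [List.mem_range'_1]; omega)]
        have hmin : min (n + 1) i = min n i := by omega
        have hn1 : (n + 1) - (i + c) = (n - (i + c)) + 1 := by omega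
        have hval : i + c + (n - (i + c)) = n := by omega
        rw [hmin, hn1, List.range'_1_concat, hval, List.append_assoc]

theorem pvMap_range'_getD (l : List Char) (s m : Nat) (hm : s + m ≤ l.length) :
    (List.range' s m).map (fun j => l.getD j ' ') = (l.drop s).take m := by
  induction m generalizing s with
  | zero => simp
  | succ m ih =>
    have hs : s < l.length := by omega
    rw [List.range'_succ, List.map_cons, List.drop_eq_getElem_cons hs, List.take_succ_cons,
      List.getD_eq_getElem l ' ' hs, ih (s + 1) (by omega)]

theorem pvMap_range_getD (l : List Char) (k : Nat) (hk : k ≤ l.length) :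
    (List.range k).map (fun j => l.getD j ' ') = l.take k := by
  rw [List.range_eq_range']
  simpa using pvMap_range'_getD l 0 k (by omega)

-- head of the run is a digit, so the run length unfolds once
theorem pvAltRun_cons_digit (l : List Char) (i : Nat) (hi : i < l.length)
    (hdig : pvDigits.contains l[i]) :
    pvAltRun (l.drop i) = 1 + pvAltRun (l.drop (i + 1)) := by
  rw [List.drop_eq_getElem_cons hi]
  simp only [pvAltRun, if_pos hdig]; omega

-- the outer loop computes B's take/drop decomposition, given no digit before i
theorem pvOuterA_eq (l : List Char) (i : Nat)
    (hpre : ∀ k, (hk : k < l.length) → k < i → ¬ pvDigits.contains l[k]) :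
    pvOuterA l i =
      String.ofList (l.take (pvAltFirst l) ++
        l.drop (pvAltFirst l + pvAltRun (l.drop (pvAltFirst l)))) := by
  unfold pvOuterA
  split
  · rename_i hi
    rw [List.getD_eq_getElem l ' ' hi]
    split
    · rename_i hdig
      have hF : pvAltFirst l = i := pvAltFirst_eq l i hi hpre hdig
      have hc : pvCountLoop l i 1 = pvAltRun (l.drop i) := by
        rw [pvCountLoop_eq, pvAltRun_cons_digit l i hi hdig]
      rw [hc, hF]
      set c := pvAltRun (l.drop i) with hcdef
      rw [pvFilter_range l.length i c, List.map_append]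
      have hmin : min l.length i = i := by omega
      rw [hmin, pvMap_range_getD l i (by omega)]
      by_cases hend : i + c ≤ l.length
      · rw [pvMap_range'_getD l (i + c) (l.length - (i + c)) (by omega)]
        have : (l.drop (i + c)).take (l.length - (i + c)) = l.drop (i + c) := by
          apply List.take_of_length_le; simp
        rw [this]
      · have h0 : l.length - (i + c) = 0 := by omega
        rw [h0, List.range'_zero]
        rw [List.drop_eq_nil_of_le (show l.length ≤ i + c by omega)]
        simp
    · rename_i hdig
      apply pvOuterA_eq l (i + 1)
      intro k hk hki
      by_cases hk' : k < i
      · exact hpre k hk hk'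
      · have : k = i := by omega
        subst this; exact hdig
  · rename_i hi
    have hF : pvAltFirst l = l.length := by
      apply pvAltFirst_eq_length
      intro k hk
      exact hpre k hk (by omega)
    rw [hF]
    rw [List.drop_eq_nil_of_le (show l.length ≤ l.length + _ by omega)]
    simp
termination_by l.length - i
decreasing_by omega

-- ===== VERDICT (by name: the statement is the Claim_ definition above) =====
theorem remove_first_num_spec : Claim_equal_remove_first_num := by
  intro strr _
  unfold Spec_remove_first_num remove_first_num remove_first_num_alt
  rw [pvOuterA_eq strr.toList 0 (by intro k hk h; omega)]
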